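-- pv_equiv track=rewrite | github.com/anthropologenie/sacred-qa-audits | src/agents/krudi_agent.py | _analyze_reality_constraints
-- ===== SOURCE A (Python) =====
-- from typing import Any, Dict, List
--
-- def _analyze_reality_constraints(
--     query: str, context: Dict[str, Any]
-- ) -> List[str]:
--     """Analyze and identify reality constraints in the query.
--
--     Args:
--         query: The question or task being analyzed
--         context: Additional contextual information
--
--     Returns:
--         List of identified reality constraints
--     """
--     constraints = []
--     query_lower = query.lower()
--
--     # Check for resource constraints
--     if any(
--         word in query_lower
--         for word in ["scale", "large", "complex", "enterprise"]
--     ):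
--         constraints.append(
--             "Scale complexity: Large-scale implementations require "
--             "infrastructure, maintenance, and operational overhead"
--         )
--
--     # Check for time constraints
--     if any(
--         word in query_lower for word in ["quickly", "fast", "immediate"]
--     ):
--         constraints.append(
--             "Time pressure: Rapid deployment may sacrifice quality, "
--             "testing, and community alignment"
--         )
--
--     # Check for theoretical/abstract elements
--     if any(
--         word in query_lower
--         for word in ["theoretical", "abstract", "ideal", "perfect"]
--     ):
--         constraints.append(
--             "Abstraction gap: Theoretical models must be translated "
--             "into concrete, implementable steps"
--         )
--
--     # Check for dependency complexity
--     if any(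
--         word in query_lower
--         for word in ["integrate", "connect", "combine", "merge"]
--     ):
--         constraints.append(
--             "Integration complexity: Dependencies introduce "
--             "maintenance burden and potential failure points"
--         )
--
--     return constraints
-- ===== SOURCE B (Python) =====
-- from typing import Any, Dict, List
--
-- _KEYWORDS = (
--     ("scale", "large", "complex", "enterprise"),
--     ("quickly", "fast", "immediate"),
--     ("theoretical", "abstract", "ideal", "perfect"),
--     ("integrate", "connect", "combine", "merge"),
-- )
--
-- _MESSAGES = (
--     "Scale complexity: Large-scale implementations require "
--     "infrastructure, maintenance, and operational overhead",
--     "Time pressure: Rapid deployment may sacrifice quality, "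
--     "testing, and community alignment",
--     "Abstraction gap: Theoretical models must be translated "
--     "into concrete, implementable steps",
--     "Integration complexity: Dependencies introduce "
--     "maintenance burden and potential failure points",
-- )
--
--
-- def _match_any(q: str, i: int, words) -> bool:
--     """Does any of `words` start at position i of q?"""
--     return any(q.startswith(w, i) for w in words)
--
--
-- def _analyze_reality_constraints(query: str, context: Dict[str, Any]) -> List[str]:
--     # Single left-to-right scan of the lowered query: at each position test
--     # which keyword groups have a keyword starting there, latching a flag
--     # per group; emit the messages of the latched groups at the end.
--     q = query.lower()
--     scale = time = abstr = integ = False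
--     for i in range(len(q)):
--         scale = scale or _match_any(q, i, _KEYWORDS[0])
--         time = time or _match_any(q, i, _KEYWORDS[1])
--         abstr = abstr or _match_any(q, i, _KEYWORDS[2])
--         integ = integ or _match_any(q, i, _KEYWORDS[3])
--     return [m for hit, m in zip((scale, time, abstr, integ), _MESSAGES) if hit]
-- ===== Notes on version B (the rewrite author's own statement) =====
-- stated objective: alternative
-- what changed: Replaces four independent substring-membership tests ('word in query') by one left-to-right scan over the query's positions that latches a boolean flag per keyword group via prefix-match-at-position, then emits the messages of the latched groups.
import Mathlib
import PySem

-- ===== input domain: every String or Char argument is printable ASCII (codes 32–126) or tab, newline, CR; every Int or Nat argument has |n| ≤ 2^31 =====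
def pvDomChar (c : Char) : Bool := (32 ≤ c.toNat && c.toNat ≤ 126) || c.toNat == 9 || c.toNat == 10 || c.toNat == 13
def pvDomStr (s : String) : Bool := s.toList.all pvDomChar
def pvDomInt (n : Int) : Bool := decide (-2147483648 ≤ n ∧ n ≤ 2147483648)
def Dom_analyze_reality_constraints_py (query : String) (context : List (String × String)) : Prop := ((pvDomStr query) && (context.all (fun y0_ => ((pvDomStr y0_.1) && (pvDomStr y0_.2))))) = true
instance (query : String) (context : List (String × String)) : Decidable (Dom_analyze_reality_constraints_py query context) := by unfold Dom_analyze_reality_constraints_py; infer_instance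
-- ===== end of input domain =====

-- B replaces A's four independent substring-membership tests by one left-to-right
-- scan over the query's positions latching a flag per keyword group (objective: alternative).

-- ===== PORT A =====
def analyze_reality_constraints_py (query : String) (_context : List (String × String)) : List String :=
  let constraints : List String := []
  let query_lower := PySem.Str.lower query
  let constraints :=
    if ["scale", "large", "complex", "enterprise"].any (fun w => PySem.Str.isIn w query_lower) then
      constraints ++ ["Scale complexity: Large-scale implementations require infrastructure, maintenance, and operational overhead"]
    else constraints
  let constraints :=
    if ["quickly", "fast", "immediate"].any (fun w => PySem.Str.isIn w query_lower) then
      constraints ++ ["Time pressure: Rapid deployment may sacrifice quality, testing, and community alignment"]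
    else constraints
  let constraints :=
    if ["theoretical", "abstract", "ideal", "perfect"].any (fun w => PySem.Str.isIn w query_lower) then
      constraints ++ ["Abstraction gap: Theoretical models must be translated into concrete, implementable steps"]
    else constraints
  let constraints :=
    if ["integrate", "connect", "combine", "merge"].any (fun w => PySem.Str.isIn w query_lower) then
      constraints ++ ["Integration complexity: Dependencies introduce maintenance burden and potential failure points"]
    else constraints
  constraints

-- ===== PORT B =====
def pvMessages : List String :=
  [ "Scale complexity: Large-scale implementations require infrastructure, maintenance, and operational overhead",
    "Time pressure: Rapid deployment may sacrifice quality, testing, and community alignment",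
    "Abstraction gap: Theoretical models must be translated into concrete, implementable steps",
    "Integration complexity: Dependencies introduce maintenance burden and potential failure points" ]

-- q.startswith(w, i) for 0 ≤ i: exact, since for a non-negative start index
-- Python's startswith(w, i) is "w is a prefix of q[i:]".
def pvMatchAny (q : List Char) (i : Nat) (ws : List String) : Bool :=
  ws.any (fun w => w.toList.isPrefixOf (q.drop i))

-- Source B: single scan over range(len(q)) (all indices non-negative, so i : Nat is exact),
-- latching four boolean flags, then the zip/filter comprehension over the messages.
def analyze_reality_constraints_py_alt (query : String) (_context : List (String × String)) : List String :=
  let q := PySem.Str.lower query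
  let hits := (List.range q.toList.length).foldl  -- range(len(q))
    (fun s i =>
      (s.1 || pvMatchAny q.toList i ["scale", "large", "complex", "enterprise"],
       s.2.1 || pvMatchAny q.toList i ["quickly", "fast", "immediate"],
       s.2.2.1 || pvMatchAny q.toList i ["theoretical", "abstract", "ideal", "perfect"],
       s.2.2.2 || pvMatchAny q.toList i ["integrate", "connect", "combine", "merge"]))
    (false, false, false, false)
  ((List.zip [hits.1, hits.2.1, hits.2.2.1, hits.2.2.2] pvMessages).filter (fun p => p.1)).map Prod.snd

-- ===== PRECONDITION & SPEC =====
def Spec_analyze_reality_constraints_py (query : String) (context : List (String × String)) (out : List String) : Prop := out = analyze_reality_constraints_py_alt query context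
instance (query : String) (context : List (String × String)) (out : List String) : Decidable (Spec_analyze_reality_constraints_py query context out) := by unfold Spec_analyze_reality_constraints_py; infer_instance

-- ===== CLAIM =====
def Claim_equal_analyze_reality_constraints_py : Prop := ∀ (query : String) (context : List (String × String)), Dom_analyze_reality_constraints_py query context → Spec_analyze_reality_constraints_py query context (analyze_reality_constraints_py query context)

-- ===== LEMMAS AND PROOFS =====

-- The four-flag fold latches each component independently as an OR over the list.
theorem pvFold4 (f0 f1 f2 f3 : Nat → Bool) (l : List Nat) (a b c d : Bool) :
    l.foldl (fun (s : Bool × Bool × Bool × Bool) i =>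
        (s.1 || f0 i, s.2.1 || f1 i, s.2.2.1 || f2 i, s.2.2.2 || f3 i)) (a, b, c, d)
      = (a || l.any f0, b || l.any f1, c || l.any f2, d || l.any f3) := by
  induction l generalizing a b c d with
  | nil => simp
  | cons x xs ih => simp [ih, Bool.or_assoc]

theorem pvAnySwap {α β : Type} (l1 : List α) (l2 : List β) (p : α → β → Bool) :
    l1.any (fun a => l2.any (fun b => p a b)) = l2.any (fun b => l1.any (fun a => p a b)) := by
  rw [Bool.eq_iff_iff]
  simp only [List.any_eq_true]
  constructor
  · rintro ⟨a, ha, b, hb, hp⟩; exact ⟨b, hb, a, ha, hp⟩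
  · rintro ⟨b, hb, a, ha, hp⟩; exact ⟨a, ha, b, hb, hp⟩

-- Scanning all positions for a prefix match of a non-empty word equals substring membership.
theorem pvScanEqIsIn (q w : List Char) (hw : w ≠ []) :
    ((List.range q.length).any fun i => w.isPrefixOf (q.drop i)) = PySem.Chars.isIn w q := by
  have key := PySem.Chars.exists_prefix_drop_iff_isIn (sub := w) (s := q)
  cases h : PySem.Chars.isIn w q with
  | true =>
    obtain ⟨j, hj⟩ := key.mpr h
    have hjlt : j < q.length := by
      by_contra hge
      have : q.drop j = [] := List.drop_eq_nil_of_le (le_of_not_gt hge)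
      rw [this] at hj
      exact hw (List.prefix_nil.mp hj)
    simp only [List.any_eq_true, List.mem_range]
    exact ⟨j, hjlt, List.isPrefixOf_iff_prefix.mpr hj⟩
  | false =>
    simp only [List.any_eq_false, List.mem_range, List.isPrefixOf_iff_prefix]
    intro i _ hp
    have := key.mp ⟨i, hp⟩
    rw [h] at this
    exact Bool.false_ne_true this

-- Per keyword group: the positional scan equals A's any-substring test.
theorem pvGroup (q : String) (ws : List String) (h : ∀ w ∈ ws, w.toList ≠ []) :
    ((List.range q.toList.length).any fun i => pvMatchAny q.toList i ws)
      = ws.any (fun w => PySem.Str.isIn w q) := by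
  unfold pvMatchAny
  rw [pvAnySwap]
  induction ws with
  | nil => rfl
  | cons w ws ih =>
    simp only [List.any_cons]
    rw [pvScanEqIsIn q.toList w.toList (h w (List.mem_cons_self ..)),
        ih (fun x hx => h x (List.mem_cons_of_mem _ hx))]
    simp [PySem.Str.isIn]

-- ===== VERDICT =====
theorem analyze_reality_constraints_py_spec : Claim_equal_analyze_reality_constraints_py := by
  intro query context _
  unfold Spec_analyze_reality_constraints_py analyze_reality_constraints_py analyze_reality_constraints_py_alt
  dsimp only
  rw [pvFold4]
  rw [pvGroup _ _ (by decide), pvGroup _ _ (by decide), pvGroup _ _ (by decide), pvGroup _ _ (by decide)]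
  cases h1 : (["scale", "large", "complex", "enterprise"].any fun w => PySem.Str.isIn w (PySem.Str.lower query)) <;>
  cases h2 : (["quickly", "fast", "immediate"].any fun w => PySem.Str.isIn w (PySem.Str.lower query)) <;>
  cases h3 : (["theoretical", "abstract", "ideal", "perfect"].any fun w => PySem.Str.isIn w (PySem.Str.lower query)) <;>
  cases h4 : (["integrate", "connect", "combine", "merge"].any fun w => PySem.Str.isIn w (PySem.Str.lower query)) <;>
    simp [pvMessages, List.zip, List.zipWith, List.filter]
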